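-- pv_equiv track=rewrite | github.com/MayHyeyeonKim/algorithms | other/ARRSTR30/SA.py | getChannelRate
-- ===== SOURCE A (Python) =====
-- def getChannelRate(views):
--     def isSpecial(subarray):
--         if len(subarray) < 3:
--             return False
--         XORfirstLast = subarray[0] ^ subarray[-1]
--         XOROthers = 0
--         for i in range(1, len(subarray) - 1):  # 두 번째 요소부터 시작
--             XOROthers ^= subarray[i]
--         return XORfirstLast == XOROthers
--
--     count = 0
--     for i in range(len(views)):
--         XOROthers = 0
--         for j in range(i + 2, len(views)):
--             XOROthers ^= views[j - 1]
--             if views[i] == XOROthers: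
--                 count += 1
--     return count % (10**9 + 7)
-- ===== SOURCE B (Python) =====
-- def getChannelRate(views):
--     # prefix[k] = XOR of views[:k], for k = 0 .. len(views)-1
--     prefix = [0]
--     for v in views[:-1]:
--         prefix.append(prefix[-1] ^ v)
--     # A's count = number of index pairs i + 2 <= j with prefix[i] == prefix[j]:
--     # count them in one pass with a lag-2 hash counter.
--     seen = {}
--     count = 0
--     for q, p in zip(prefix, prefix[2:]):
--         seen[q] = seen.get(q, 0) + 1
--         count += seen.get(p, 0)
--     return count % (10 ** 9 + 7)
-- ===== Notes on version B (the rewrite author's own statement) =====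
-- stated objective: faster
-- what changed: Replaced the quadratic double loop (re-XORing middles for every pair) by a single pass: a prefix-XOR array plus a lag-2 hash counter counting index pairs i+2<=j with equal prefix XOR.
import Mathlib
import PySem

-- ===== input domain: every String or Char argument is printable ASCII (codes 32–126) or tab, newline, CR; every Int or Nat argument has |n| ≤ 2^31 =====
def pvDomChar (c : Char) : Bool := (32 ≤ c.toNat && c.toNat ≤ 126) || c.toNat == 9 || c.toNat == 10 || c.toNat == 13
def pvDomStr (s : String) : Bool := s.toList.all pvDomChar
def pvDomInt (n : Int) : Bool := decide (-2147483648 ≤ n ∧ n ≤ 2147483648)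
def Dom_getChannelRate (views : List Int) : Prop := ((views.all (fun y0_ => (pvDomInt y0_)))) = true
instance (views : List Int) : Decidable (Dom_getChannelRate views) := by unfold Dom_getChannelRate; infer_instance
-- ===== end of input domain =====

-- B replaces A's quadratic double loop by one pass over a prefix-XOR list with a lag-2 hash counter (objective: faster).

-- ===== PORT A =====
-- views[k] for indices that A's loops keep in range (0 ≤ i < n, i+1 ≤ j-1 ≤ n-2): the .getD 0 default is never used
def pvGetA (views : List Int) (i : Int) : Int := (PySem.List.pyGet? views i).getD 0

def pvInnerStep (views : List Int) (i : Int) (st : Int × Int) (j : Int) : Int × Int :=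
  let x := PySem.Int.bxor st.2 (pvGetA views (j - 1))
  if pvGetA views i = x then (st.1 + 1, x) else (st.1, x)

def pvOuterStep (views : List Int) (count : Int) (i : Int) : Int :=
  ((PySem.List.pyRange (i + 2) (views.length : Int) 1).foldl (pvInnerStep views i) (count, 0)).1

def getChannelRate (views : List Int) : Int :=
  PySem.Int.mod ((PySem.List.pyRange 0 (views.length : Int) 1).foldl (pvOuterStep views) 0) (10 ^ 9 + 7)

-- ===== PORT B =====
-- prefix.append(prefix[-1] ^ v); prefix is never empty, so the .getD 0 default is never used
def pvPrefStep (acc : List Int) (v : Int) : List Int :=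
  acc ++ [PySem.Int.bxor ((PySem.List.pyGet? acc (-1)).getD 0) v]

-- seen[q] = seen.get(q, 0) + 1; count += seen.get(p, 0)
def pvZStep (st : PySem.Dict Int Int × Int) (qp : Int × Int) : PySem.Dict Int Int × Int :=
  let seen := st.1.insert qp.1 (st.1.getD qp.1 0 + 1)
  (seen, st.2 + seen.getD qp.2 0)

def getChannelRate_alt (views : List Int) : Int :=
  let prefixL := (PySem.List.slice views none (some (-1))).foldl pvPrefStep [0]
  let st := (prefixL.zip (PySem.List.slice prefixL (some 2) none)).foldl pvZStep (PySem.Dict.empty, 0)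
  PySem.Int.mod st.2 (10 ^ 9 + 7)

-- ===== PRECONDITION & SPEC =====
def Spec_getChannelRate (views : List Int) (out : Int) : Prop := out = getChannelRate_alt views
instance (views : List Int) (out : Int) : Decidable (Spec_getChannelRate views out) := by unfold Spec_getChannelRate; infer_instance

-- ===== CLAIM (what is proved, stated in full; the proofs are below) =====
def Claim_equal_getChannelRate : Prop := ∀ (views : List Int), Dom_getChannelRate views → Spec_getChannelRate views (getChannelRate views)

-- ===== LEMMAS AND PROOFS =====

-- two's-complement encoding, to get associativity/cancellation of Python's ^ on Int
def pvEnc (s : Bool) (m : Nat) : Int := if s then -(m : Int) - 1 else (m : Int)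

lemma pv_enc_dec (a : Int) : a = pvEnc (decide (a < 0)) (if a < 0 then (-a - 1).toNat else a.toNat) := by
  by_cases h : a < 0
  · simp [pvEnc, h]
  · simp [pvEnc, h]; omega

lemma pv_bxor_enc (s1 : Bool) (m1 : Nat) (s2 : Bool) (m2 : Nat) :
    PySem.Int.bxor (pvEnc s1 m1) (pvEnc s2 m2) = pvEnc (xor s1 s2) (m1 ^^^ m2) := by
  cases s1 <;> cases s2 <;> simp only [pvEnc, PySem.Int.bxor, Bool.xor] <;>
    split_ifs <;> simp_all <;> omega

lemma pv_bxor_assoc (a b c : Int) :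
    PySem.Int.bxor (PySem.Int.bxor a b) c = PySem.Int.bxor a (PySem.Int.bxor b c) := by
  rw [pv_enc_dec a, pv_enc_dec b, pv_enc_dec c]
  rw [pv_bxor_enc, pv_bxor_enc, pv_bxor_enc, pv_bxor_enc]
  rw [Bool.xor_assoc, Nat.xor_assoc]

lemma pv_bxor_cancel (a b : Int) : PySem.Int.bxor (PySem.Int.bxor a b) b = a := by
  rw [pv_bxor_assoc, PySem.Int.bxor_self, PySem.Int.bxor_zero]

lemma pv_bxor_inj (c : Int) : Function.Injective (fun e => PySem.Int.bxor c e) := by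
  intro a b h
  have h2 : PySem.Int.bxor (PySem.Int.bxor c a) c = PySem.Int.bxor (PySem.Int.bxor c b) c := by
    simpa using congrArg (fun t => PySem.Int.bxor t c) h
  rwa [PySem.Int.bxor_comm c a, PySem.Int.bxor_comm c b, pv_bxor_cancel, pv_bxor_cancel] at h2

-- running prefix-xor list starting at x
def pvScan (x : Int) : List Int → List Int
  | [] => [x]
  | v :: w => x :: pvScan (PySem.Int.bxor x v) w

-- value of A's inner loop: running xor compared against vi
def pvCnt (vi x : Int) : List Int → Int
  | [] => 0
  | v :: w => (if vi = PySem.Int.bxor x v then 1 else 0) + pvCnt vi (PySem.Int.bxor x v) w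

-- pairs (i, j), j ≥ i+2, with equal entries: A's orientation
def pvHA : List Int → Int
  | [] => 0
  | a :: t => ((t.drop 1).count a : Int) + pvHA t

def pvTerm (views : List Int) (i : Nat) : Int :=
  pvCnt (pvGetA views (i : Int)) 0 ((views.drop (i + 1)).take (views.length - i - 2))

def pvASpec : List Int → Int
  | [] => 0
  | v :: rest => pvCnt v 0 (rest.take (rest.length - 1)) + pvASpec rest

def pvZSpec (done : List Int) : List (Int × Int) → Int
  | [] => 0
  | qp :: rest => (((done ++ [qp.1]).count qp.2 : Int)) + pvZSpec (done ++ [qp.1]) rest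

def pvSumCnt (done l : List Int) : Int := (l.map (fun p => ((done.count p : Int)))).sum

-- ---- A side ----

lemma pv_inner_fold (views : List Int) (i : Int) :
    ∀ (js : List Int) (c x : Int),
      ((js.foldl (pvInnerStep views i) (c, x)).1
        = c + pvCnt (pvGetA views i) x (js.map (fun j => pvGetA views (j - 1)))) := by
  intro js
  induction js with
  | nil => intro c x; simp [pvCnt]
  | cons j js ih =>
    intro c x
    rw [List.foldl_cons, List.map_cons]
    rw [show pvCnt (pvGetA views i) x (pvGetA views (j - 1) :: js.map (fun j => pvGetA views (j - 1)))
        = (if pvGetA views i = PySem.Int.bxor x (pvGetA views (j - 1)) then 1 else 0)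
          + pvCnt (pvGetA views i) (PySem.Int.bxor x (pvGetA views (j - 1)))
              (js.map (fun j => pvGetA views (j - 1))) from rfl]
    by_cases h : pvGetA views i = PySem.Int.bxor x (pvGetA views (j - 1))
    · rw [show pvInnerStep views i (c, x) j
          = (c + 1, PySem.Int.bxor x (pvGetA views (j - 1))) from by simp [pvInnerStep, h], ih]
      rw [if_pos h]; ring
    · rw [show pvInnerStep views i (c, x) j
          = (c, PySem.Int.bxor x (pvGetA views (j - 1))) from by simp [pvInnerStep, h], ih]
      rw [if_neg h]; ring

lemma pv_map_range (views : List Int) :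
    ∀ (k a : Nat), a + k ≤ views.length →
      (PySem.List.pyRange ((a : Int) + 1) ((a : Int) + 1 + (k : Int)) 1).map
          (fun j => pvGetA views (j - 1))
        = (views.drop a).take k := by
  intro k
  induction k with
  | zero => intro a h; simp [PySem.List.pyRange_one_eq_nil]
  | succ k ih =>
    intro a h
    rw [PySem.List.pyRange_one_cons (by omega : (a : Int) + 1 < (a : Int) + 1 + ((k + 1 : Nat) : Int))]
    have ha : a < views.length := by omega
    have hget : pvGetA views ((a : Int) + 1 - 1) = views[a] := by
      simp [pvGetA, ha]
    have hdrop : views.drop a = views[a] :: views.drop (a + 1) :=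
      List.drop_eq_getElem_cons ha
    rw [List.map_cons, hget, hdrop, List.take_succ_cons]
    have h2 := ih (a + 1) (by omega)
    rw [show ((a + 1 : Nat) : Int) + 1 = (a : Int) + 1 + 1 by push_cast; ring,
        show ((a : Int) + 1 + 1) + (k : Int) = (a : Int) + 1 + ((k + 1 : Nat) : Int) by push_cast; ring] at h2
    rw [h2]

lemma pv_outer_term (views : List Int) (c : Int) (iN : Nat) (h : iN < views.length) :
    pvOuterStep views c (iN : Int) = c + pvTerm views iN := by
  unfold pvOuterStep pvTerm
  rw [pv_inner_fold]
  by_cases hc : iN + 2 ≤ views.length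
  · have h2 := pv_map_range views (views.length - iN - 2) (iN + 1) (by omega)
    rw [show ((iN + 1 : Nat) : Int) + 1 = (iN : Int) + 2 by omega] at h2
    rw [show ((iN : Int) + 2) + ((views.length - iN - 2 : Nat) : Int) = (views.length : Int) by
          omega] at h2
    rw [h2]
  · rw [PySem.List.pyRange_one_eq_nil (by omega : (views.length : Int) ≤ (iN : Int) + 2)]
    rw [show views.length - iN - 2 = 0 by omega]
    simp [pvCnt]

lemma pv_sum_spec (views : List Int) :
    ((List.range views.length).map (pvTerm views)).sum = pvASpec views := by
  induction views with
  | nil => simp [pvASpec]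
  | cons v rest ih =>
    rw [List.length_cons, List.range_succ_eq_map, List.map_cons, List.sum_cons, List.map_map]
    have h0 : pvTerm (v :: rest) 0 = pvCnt v 0 (rest.take (rest.length - 1)) := by
      unfold pvTerm
      simp [pvGetA]
    have hs : ∀ i : Nat, pvTerm (v :: rest) (i + 1) = pvTerm rest i := by
      intro i
      unfold pvTerm
      have hg : pvGetA (v :: rest) ((i + 1 : Nat) : Int) = pvGetA rest (i : Int) := by
        simp [pvGetA, PySem.List.pyGet?_natCast]
      have hl : (v :: rest).length - (i + 1) - 2 = rest.length - i - 2 := by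
        simp
      rw [hg, hl, List.drop_succ_cons]
    have hmap : ((List.range rest.length).map (pvTerm (v :: rest) ∘ Nat.succ)).sum
        = ((List.range rest.length).map (pvTerm rest)).sum := by
      congr 1
      apply List.map_congr_left
      intro i _
      simpa using hs i
    rw [hmap, ih, h0, pvASpec]

lemma pv_A_eq (views : List Int) :
    getChannelRate views = PySem.Int.mod (pvASpec views) (10 ^ 9 + 7) := by
  unfold getChannelRate
  congr 1
  rw [PySem.List.pyRange_zero_natCast]
  rw [List.foldl_map]
  rw [PySem.List.foldl_congr_mem' _ _ (fun (c : Int) (iN : Nat) => c + pvTerm views iN) _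
        (by intro iN hiN c
            exact pv_outer_term views c iN (List.mem_range.mp hiN))]
  rw [PySem.List.foldl_add]
  rw [pv_sum_spec]
  ring

-- ---- scan lemmas ----

lemma pvScan_head : ∀ (w : List Int) (x : Int), pvScan x w = x :: (pvScan x w).drop 1 := by
  intro w x
  cases w <;> simp [pvScan]

lemma pv_cnt_count : ∀ (w : List Int) (vi x : Int),
    pvCnt vi x w = (((pvScan x w).drop 1).count vi : Int) := by
  intro w
  induction w with
  | nil => intro vi x; simp [pvCnt, pvScan]
  | cons v w ih =>
    intro vi x
    rw [show pvScan x (v :: w) = x :: pvScan (PySem.Int.bxor x v) w from rfl]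
    rw [show (x :: pvScan (PySem.Int.bxor x v) w).drop 1 = pvScan (PySem.Int.bxor x v) w from rfl]
    rw [pvScan_head w (PySem.Int.bxor x v), List.count_cons]
    rw [show pvCnt vi x (v :: w)
        = (if vi = PySem.Int.bxor x v then 1 else 0) + pvCnt vi (PySem.Int.bxor x v) w from rfl]
    rw [ih]
    by_cases h : vi = PySem.Int.bxor x v
    · simp [h]; ring
    · simp [h, Ne.symm h]

lemma pv_scan_shift : ∀ (w : List Int) (c y : Int),
    pvScan (PySem.Int.bxor c y) w = (pvScan y w).map (fun e => PySem.Int.bxor c e) := by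
  intro w
  induction w with
  | nil => intro c y; simp [pvScan]
  | cons v w ih =>
    intro c y
    simp only [pvScan, List.map_cons]
    rw [pv_bxor_assoc, ih]

lemma pv_count_shift (w : List Int) (x v : Int) :
    (((pvScan (PySem.Int.bxor x v) w).drop 1).count x : Int)
      = (((pvScan 0 w).drop 1).count v : Int) := by
  have h1 : pvScan (PySem.Int.bxor x v) w
      = (pvScan 0 w).map (fun e => PySem.Int.bxor (PySem.Int.bxor x v) e) := by
    rw [← pv_scan_shift, PySem.Int.bxor_zero]
  rw [h1, ← List.map_drop]
  have h2 := List.count_map_of_injective (List.drop 1 (pvScan 0 w)) _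
      (pv_bxor_inj (PySem.Int.bxor x v)) v
  rw [pv_bxor_cancel] at h2
  rw [h2]

lemma pv_spec_scan : ∀ (views : List Int) (x : Int),
    pvASpec views = pvHA (pvScan x (views.take (views.length - 1))) := by
  intro views
  induction views with
  | nil => intro x; simp [pvASpec, pvScan, pvHA]
  | cons v rest ih =>
    intro x
    cases rest with
    | nil => simp [pvASpec, pvCnt, pvScan, pvHA]
    | cons r rs =>
      have hw : (v :: r :: rs).take ((v :: r :: rs).length - 1)
          = v :: (r :: rs).take ((r :: rs).length - 1) := by
        rw [show (v :: r :: rs).length - 1 = rs.length + 1 by simp,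
            show (r :: rs).length - 1 = rs.length by simp, List.take_succ_cons]
      rw [hw]
      rw [show pvScan x (v :: (r :: rs).take ((r :: rs).length - 1))
          = x :: pvScan (PySem.Int.bxor x v) ((r :: rs).take ((r :: rs).length - 1)) from rfl]
      rw [show pvHA (x :: pvScan (PySem.Int.bxor x v) ((r :: rs).take ((r :: rs).length - 1)))
          = (((pvScan (PySem.Int.bxor x v) ((r :: rs).take ((r :: rs).length - 1))).drop 1).count x : Int)
            + pvHA (pvScan (PySem.Int.bxor x v) ((r :: rs).take ((r :: rs).length - 1))) from rfl]
      rw [pv_count_shift, ← pv_cnt_count, ← ih (PySem.Int.bxor x v)]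
      rfl

-- ---- B side ----

lemma pv_pref_fold : ∀ (w front : List Int) (x : Int),
    w.foldl pvPrefStep (front ++ [x]) = front ++ pvScan x w := by
  intro w
  induction w with
  | nil => intro front x; simp [pvScan]
  | cons v w ih =>
    intro front x
    rw [List.foldl_cons]
    rw [show pvPrefStep (front ++ [x]) v = (front ++ [x]) ++ [PySem.Int.bxor x v] from by
          simp [pvPrefStep, PySem.List.pyGet?_neg_one_append_singleton]]
    rw [ih]
    simp [pvScan]

lemma pv_sumcnt_append (done l : List Int) (q : Int) :
    pvSumCnt (done ++ [q]) l = pvSumCnt done l + (l.count q : Int) := by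
  induction l with
  | nil => simp [pvSumCnt]
  | cons p l ih =>
    simp only [pvSumCnt, List.map_cons, List.sum_cons] at *
    rw [ih, List.count_append, List.count_cons]
    by_cases h : p = q
    · simp [h]; ring
    · simp [h, Ne.symm h]; ring

lemma pv_zip_fold : ∀ (pairs : List (Int × Int)) (done : List Int)
      (seen : PySem.Dict Int Int) (c : Int),
    (∀ v, seen.getD v 0 = (done.count v : Int)) →
    ((pairs.foldl pvZStep (seen, c)).2 = c + pvZSpec done pairs) := by
  intro pairs
  induction pairs with
  | nil => intro done seen c h; simp [pvZSpec]
  | cons qp rest ih =>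
    intro done seen c h
    rw [List.foldl_cons]
    have hnew : ∀ v, (seen.insert qp.1 (seen.getD qp.1 0 + 1)).getD v 0
        = (((done ++ [qp.1]).count v : Int)) := by
      intro v
      rw [PySem.Dict.getD_insert]
      rw [List.count_append, List.count_cons]
      by_cases hv : v = qp.1
      · simp [hv, h]
      · simp [hv, Ne.symm hv, h]
    have hrec := ih (done ++ [qp.1]) _ (c + (seen.insert qp.1 (seen.getD qp.1 0 + 1)).getD qp.2 0) hnew
    rw [show pvZStep (seen, c) qp
        = (seen.insert qp.1 (seen.getD qp.1 0 + 1),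
           c + (seen.insert qp.1 (seen.getD qp.1 0 + 1)).getD qp.2 0) from rfl]
    rw [hrec, hnew qp.2]
    rw [show pvZSpec done (qp :: rest)
        = (((done ++ [qp.1]).count qp.2 : Int)) + pvZSpec (done ++ [qp.1]) rest from rfl]
    ring

lemma pv_zspec_ha : ∀ (l done : List Int),
    pvZSpec done (l.zip (l.drop 2)) = pvHA l + pvSumCnt done (l.drop 2) := by
  intro l
  induction l with
  | nil => intro done; simp [pvZSpec, pvHA, pvSumCnt]
  | cons a t ih =>
    intro done
    match t with
    | [] => simp [pvZSpec, pvHA, pvSumCnt]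
    | [b] => simp [pvZSpec, pvHA, pvSumCnt]
    | b :: c :: t'' =>
      rw [show (a :: b :: c :: t'').drop 2 = c :: t'' from rfl]
      rw [show (a :: b :: c :: t'').zip (c :: t'')
          = (a, c) :: ((b :: c :: t'').zip t'') from rfl]
      rw [show pvZSpec done ((a, c) :: ((b :: c :: t'').zip t''))
          = (((done ++ [a]).count c : Int)) + pvZSpec (done ++ [a]) ((b :: c :: t'').zip t'') from rfl]
      have hih := ih (done ++ [a])
      rw [show (b :: c :: t'').drop 2 = t'' from rfl] at hih
      rw [hih]
      rw [pv_sumcnt_append]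
      rw [show pvHA (a :: b :: c :: t'')
          = (((c :: t'').count a : Int)) + pvHA (b :: c :: t'') from rfl]
      rw [show pvSumCnt done (c :: t'')
          = (done.count c : Int) + pvSumCnt done t'' from by simp [pvSumCnt]]
      rw [List.count_append, List.count_cons]
      by_cases h : a = c
      · simp [h]; ring
      · simp [h, Ne.symm h]; ring

lemma pv_B_eq (views : List Int) :
    getChannelRate_alt views
      = PySem.Int.mod (pvHA (pvScan 0 (views.take (views.length - 1)))) (10 ^ 9 + 7) := by
  have hsl : PySem.List.slice views none (some (-1)) = views.take (views.length - 1) := by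
    rw [PySem.List.slice_to_neg_one, List.dropLast_eq_take]
  have hpre : (views.take (views.length - 1)).foldl pvPrefStep [0]
      = pvScan 0 (views.take (views.length - 1)) := by
    simpa using pv_pref_fold (views.take (views.length - 1)) [] 0
  rw [show getChannelRate_alt views
      = PySem.Int.mod
          (((((PySem.List.slice views none (some (-1))).foldl pvPrefStep [0]).zip
              (PySem.List.slice ((PySem.List.slice views none (some (-1))).foldl pvPrefStep [0])
                (some 2) none)).foldl pvZStep (PySem.Dict.empty, 0)).2) (10 ^ 9 + 7) from rfl]
  rw [hsl, hpre]
  rw [PySem.List.slice_from _ (by norm_num : (0 : Int) ≤ 2)]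
  rw [show ((2 : Int).toNat) = 2 from rfl]
  rw [pv_zip_fold _ [] PySem.Dict.empty 0 (by intro v; simp [PySem.Dict.getD_empty])]
  rw [pv_zspec_ha]
  rw [show pvSumCnt [] ((pvScan 0 (views.take (views.length - 1))).drop 2) = 0 from by
        simp [pvSumCnt]]
  ring_nf

-- ===== VERDICT (by name: the statement is the Claim_ definition above) =====
theorem getChannelRate_spec : Claim_equal_getChannelRate := by
  intro views _
  unfold Spec_getChannelRate
  rw [pv_A_eq, pv_B_eq, pv_spec_scan views 0]
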